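-- pv_equiv track=rewrite | github.com/jmorillo42/push-swap-test | push-swap-test.py | points_100
-- ===== SOURCE A (Python) =====
-- LRED = '\033[1;31m'
--
-- LGREEN = '\033[1;32m'
--
-- CYAN = '\033[1;36m'
--
-- RESET = '\033[0m'
--
-- def points_100(stats):
--     result = []
--     for value in stats:
--         if value < 0 or value >= 1500:
--             result.append(0)
--         elif value < 700:
--             result.append(5)
--         elif value < 900:
--             result.append(4)
--         elif value < 1100:
--             result.append(3)
--         elif value < 1300:
--             result.append(2)
--         else:
--             result.append(1)
--     return points_message(result)
--
-- def points_message(points):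
--     return f'{CYAN}{points[0]}{RESET} [{LGREEN}{points[1]}{RESET}-{LRED}{points[2]}{RESET}]'
-- ===== SOURCE B (Python) =====
-- LRED = '\033[1;31m'
-- LGREEN = '\033[1;32m'
-- CYAN = '\033[1;36m'
-- RESET = '\033[0m'
--
-- THRESHOLDS = (0, 700, 900, 1100, 1300, 1500)
-- MAPPING = (0, 5, 4, 3, 2, 1, 0)
--
-- def _score(value):
--     return MAPPING[sum(value >= t for t in THRESHOLDS)]
--
-- def points_100(stats):
--     first, second, third = (_score(v) for v in stats[:3])
--     return f'{CYAN}{first}{RESET} [{LGREEN}{second}{RESET}-{LRED}{third}{RESET}]'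
-- ===== Notes on version B (the rewrite author's own statement) =====
-- stated objective: faster
-- what changed: Replaces the if/elif cascade with a threshold-count table lookup (MAPPING[number of thresholds <= value]) and scores only the first three values the message uses, instead of bucketing the whole list and indexing afterwards.
-- outside the precondition, e.g. on points_100([0]): A raises IndexError, B raises ValueError
import Mathlib
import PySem

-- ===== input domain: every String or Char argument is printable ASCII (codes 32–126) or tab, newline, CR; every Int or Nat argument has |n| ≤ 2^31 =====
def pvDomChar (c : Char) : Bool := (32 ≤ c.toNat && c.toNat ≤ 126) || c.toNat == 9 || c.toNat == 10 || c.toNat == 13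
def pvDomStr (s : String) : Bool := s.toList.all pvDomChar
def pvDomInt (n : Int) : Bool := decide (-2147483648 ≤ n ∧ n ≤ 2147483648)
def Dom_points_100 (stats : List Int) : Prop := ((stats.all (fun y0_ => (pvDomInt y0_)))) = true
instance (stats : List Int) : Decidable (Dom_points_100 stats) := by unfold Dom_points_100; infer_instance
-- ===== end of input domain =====

-- B replaces A's if/elif cascade by a threshold-count table lookup and scores only the
-- three values the message uses (idiomatic; same observable result).

def pvLRED : String := "\x1b[1;31m"
def pvLGREEN : String := "\x1b[1;32m"
def pvCYAN : String := "\x1b[1;36m"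
def pvRESET : String := "\x1b[0m"

-- ===== PORT A =====
-- points_message(points): points[0..2] raise IndexError when missing → none-case "" is
-- excluded by Pre_points_100.
def pvPointsMessage (points : List Int) : String :=
  match PySem.List.pyGet? points 0, PySem.List.pyGet? points 1, PySem.List.pyGet? points 2 with
  | some p0, some p1, some p2 =>
      pvCYAN ++ PySem.Int.toStr p0 ++ pvRESET ++ " [" ++ pvLGREEN ++ PySem.Int.toStr p1
        ++ pvRESET ++ "-" ++ pvLRED ++ PySem.Int.toStr p2 ++ pvRESET ++ "]"
  | _, _, _ => ""  -- IndexError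

def points_100 (stats : List Int) : String :=
  pvPointsMessage (stats.foldl (fun result value =>
    result ++ [if value < 0 ∨ 1500 ≤ value then (0 : Int)
               else if value < 700 then 5
               else if value < 900 then 4
               else if value < 1100 then 3
               else if value < 1300 then 2
               else 1]) [])

-- ===== PORT B =====
def pvTHRESHOLDS : List Int := [0, 700, 900, 1100, 1300, 1500]
def pvMAPPING : List Int := [0, 5, 4, 3, 2, 1, 0]

-- _score(value) = MAPPING[sum(value >= t for t in THRESHOLDS)]; the index is always in
-- range, so pyGetD's default 0 is never used.
def pvScore (value : Int) : Int :=
  PySem.List.pyGetD pvMAPPING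
    (pvTHRESHOLDS.foldl (fun acc t => acc + (if t ≤ value then 1 else 0)) 0) 0

-- unpacking 'first, second, third = …' raises ValueError unless exactly three → "" case
-- is excluded by Pre_points_100.
def points_100_alt (stats : List Int) : String :=
  match (PySem.List.slice stats none (some 3)).map pvScore with
  | [first, second, third] =>
      pvCYAN ++ PySem.Int.toStr first ++ pvRESET ++ " [" ++ pvLGREEN ++ PySem.Int.toStr second
        ++ pvRESET ++ "-" ++ pvLRED ++ PySem.Int.toStr third ++ pvRESET ++ "]"
  | _ => ""  -- ValueError

-- ===== PRECONDITION & SPEC =====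
-- A's points_message indexes points[0], points[1], points[2]: on lists with fewer than
-- three elements A raises IndexError, so those inputs are excluded.
def Pre_points_100 (stats : List Int) : Prop := 3 ≤ stats.length
instance (stats : List Int) : Decidable (Pre_points_100 stats) := by unfold Pre_points_100; infer_instance
def pvWitness_points_100 : List Int := [100, 800, 1600]

def Spec_points_100 (stats : List Int) (out : String) : Prop := out = points_100_alt stats
instance (stats : List Int) (out : String) : Decidable (Spec_points_100 stats out) := by unfold Spec_points_100; infer_instance

-- ===== CLAIM (what is proved, stated in full; the proofs are below) =====
def Claim_equal_points_100 : Prop := ∀ (stats : List Int), Dom_points_100 stats → Pre_points_100 stats → Spec_points_100 stats (points_100 stats)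

-- ===== LEMMAS AND PROOFS =====

lemma pvScore_eq (v : Int) :
    pvScore v = (if v < 0 ∨ 1500 ≤ v then (0 : Int)
                 else if v < 700 then 5
                 else if v < 900 then 4
                 else if v < 1100 then 3
                 else if v < 1300 then 2
                 else 1) := by
  unfold pvScore pvTHRESHOLDS pvMAPPING
  simp only [List.foldl]
  rcases lt_or_ge v 0 with h0 | h0
  · rw [if_neg (by omega : ¬((0:Int) ≤ v)), if_neg (by omega : ¬((700:Int) ≤ v)), if_neg (by omega : ¬((900:Int) ≤ v)), if_neg (by omega : ¬((1100:Int) ≤ v)), if_neg (by omega : ¬((1300:Int) ≤ v)), if_neg (by omega : ¬((1500:Int) ≤ v)), if_pos (Or.inl (by omega : v < 0))]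
    decide
  rcases lt_or_ge v 700 with h1 | h1
  · rw [if_pos (by omega : ((0:Int) ≤ v)), if_neg (by omega : ¬((700:Int) ≤ v)), if_neg (by omega : ¬((900:Int) ≤ v)), if_neg (by omega : ¬((1100:Int) ≤ v)), if_neg (by omega : ¬((1300:Int) ≤ v)), if_neg (by omega : ¬((1500:Int) ≤ v)), if_neg (by omega : ¬(v < 0 ∨ (1500:Int) ≤ v)), if_pos (by omega : v < (700:Int))]
    decide
  rcases lt_or_ge v 900 with h2 | h2
  · rw [if_pos (by omega : ((0:Int) ≤ v)), if_pos (by omega : ((700:Int) ≤ v)), if_neg (by omega : ¬((900:Int) ≤ v)), if_neg (by omega : ¬((1100:Int) ≤ v)), if_neg (by omega : ¬((1300:Int) ≤ v)), if_neg (by omega : ¬((1500:Int) ≤ v)), if_neg (by omega : ¬(v < 0 ∨ (1500:Int) ≤ v)), if_neg (by omega : ¬(v < (700:Int))), if_pos (by omega : v < (900:Int))]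
    decide
  rcases lt_or_ge v 1100 with h3 | h3
  · rw [if_pos (by omega : ((0:Int) ≤ v)), if_pos (by omega : ((700:Int) ≤ v)), if_pos (by omega : ((900:Int) ≤ v)), if_neg (by omega : ¬((1100:Int) ≤ v)), if_neg (by omega : ¬((1300:Int) ≤ v)), if_neg (by omega : ¬((1500:Int) ≤ v)), if_neg (by omega : ¬(v < 0 ∨ (1500:Int) ≤ v)), if_neg (by omega : ¬(v < (700:Int))), if_neg (by omega : ¬(v < (900:Int))), if_pos (by omega : v < (1100:Int))]
    decide
  rcases lt_or_ge v 1300 with h4 | h4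
  · rw [if_pos (by omega : ((0:Int) ≤ v)), if_pos (by omega : ((700:Int) ≤ v)), if_pos (by omega : ((900:Int) ≤ v)), if_pos (by omega : ((1100:Int) ≤ v)), if_neg (by omega : ¬((1300:Int) ≤ v)), if_neg (by omega : ¬((1500:Int) ≤ v)), if_neg (by omega : ¬(v < 0 ∨ (1500:Int) ≤ v)), if_neg (by omega : ¬(v < (700:Int))), if_neg (by omega : ¬(v < (900:Int))), if_neg (by omega : ¬(v < (1100:Int))), if_pos (by omega : v < (1300:Int))]
    decide
  rcases lt_or_ge v 1500 with h5 | h5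
  · rw [if_pos (by omega : ((0:Int) ≤ v)), if_pos (by omega : ((700:Int) ≤ v)), if_pos (by omega : ((900:Int) ≤ v)), if_pos (by omega : ((1100:Int) ≤ v)), if_pos (by omega : ((1300:Int) ≤ v)), if_neg (by omega : ¬((1500:Int) ≤ v)), if_neg (by omega : ¬(v < 0 ∨ (1500:Int) ≤ v)), if_neg (by omega : ¬(v < (700:Int))), if_neg (by omega : ¬(v < (900:Int))), if_neg (by omega : ¬(v < (1100:Int))), if_neg (by omega : ¬(v < (1300:Int)))]
    decide
  rw [if_pos (by omega : ((0:Int) ≤ v)), if_pos (by omega : ((700:Int) ≤ v)), if_pos (by omega : ((900:Int) ≤ v)), if_pos (by omega : ((1100:Int) ≤ v)), if_pos (by omega : ((1300:Int) ≤ v)), if_pos (by omega : ((1500:Int) ≤ v)), if_pos (Or.inr (by omega : (1500:Int) ≤ v))]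
  decide

theorem points_100_spec : Claim_equal_points_100 := by
  intro stats hdom hpre
  unfold Spec_points_100
  match stats, hpre with
  | a :: b :: c :: rest, _ =>
    unfold points_100 points_100_alt
    have hs : PySem.List.slice (a :: b :: c :: rest) none (some 3) = [a, b, c] := by
      rw [PySem.List.slice_to _ (by omega)]
      rfl
    rw [PySem.List.foldl_append_singleton_eq_map, hs]
    simp [pvScore_eq, pvPointsMessage, PySem.List.pyGet?, PySem.List.pyIdx?,
      (by omega : (0:Int) ≤ (rest.length : Int) + 1 + 1), (by omega : (0:Int) ≤ (rest.length : Int) + 1),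
      (by omega : (2:Int) ≤ (rest.length : Int) + 1 + 1)]
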